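-- pv_equiv track=rewrite | github.com/huugof/terrain-modeler | src/va_lidar_context/pipeline/build.py | _validate_outputs
-- ===== SOURCE A (Python) =====
-- from typing import Any, Dict, Iterable
--
-- OUTPUT_CHOICES = {"buildings", "terrain", "contours", "parcels", "naip", "xyz"}
--
-- def _validate_outputs(outputs: Iterable[str]) -> set[str]:
--     cleaned = []
--     for value in outputs:
--         if value is None:
--             continue
--         name = value.strip().lower()
--         if not name:
--             continue
--         cleaned.append(name)
--
--     if not cleaned:
--         raise ValueError(
--             "No outputs specified. Provide --outputs with at least one value."
--         )
--
--     unknown = [name for name in cleaned if name not in OUTPUT_CHOICES]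
--     if unknown:
--         raise ValueError(
--             "Unknown outputs: "
--             + ", ".join(sorted(set(unknown)))
--             + f" (valid: {', '.join(sorted(OUTPUT_CHOICES))})"
--         )
--
--     # Preserve order while de-duplicating
--     result: list[str] = []
--     seen: set[str] = set()
--     for name in cleaned:
--         if name in seen:
--             continue
--         result.append(name)
--         seen.add(name)
--     return set(result)
-- ===== SOURCE B (Python) =====
-- OUTPUT_CHOICES = {"buildings", "terrain", "contours", "parcels", "naip", "xyz"}
--
-- def _validate_outputs(outputs):
--     result = set()
--     unknown = []
--     for value in outputs:
--         if value is None: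
--             continue
--         name = value.strip().lower()
--         if not name:
--             continue
--         result.add(name)
--         if name not in OUTPUT_CHOICES:
--             unknown.append(name)
--     if not result:
--         raise ValueError(
--             "No outputs specified. Provide --outputs with at least one value."
--         )
--     if unknown:
--         raise ValueError(
--             "Unknown outputs: "
--             + ", ".join(sorted(set(unknown)))
--             + f" (valid: {', '.join(sorted(OUTPUT_CHOICES))})"
--         )
--     return result
-- ===== Notes on version B (the rewrite author's own statement) =====
-- stated objective: simpler
-- what changed: B replaces A's three sequential passes (build cleaned list, unknown comprehension, order-preserving dedup loop) by one pass that maintains the result set and the unknown list directly.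
import Mathlib
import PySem

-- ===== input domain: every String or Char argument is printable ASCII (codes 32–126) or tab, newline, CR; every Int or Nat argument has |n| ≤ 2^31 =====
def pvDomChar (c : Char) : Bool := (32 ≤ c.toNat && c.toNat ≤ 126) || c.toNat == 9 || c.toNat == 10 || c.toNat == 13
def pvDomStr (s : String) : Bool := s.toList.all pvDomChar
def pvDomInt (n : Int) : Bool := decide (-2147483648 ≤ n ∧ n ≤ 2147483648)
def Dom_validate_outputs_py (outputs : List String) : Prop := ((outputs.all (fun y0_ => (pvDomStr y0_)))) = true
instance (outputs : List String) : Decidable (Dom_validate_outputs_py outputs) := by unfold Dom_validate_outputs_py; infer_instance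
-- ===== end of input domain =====

-- B folds A's three passes (cleaned list, unknown comprehension, dedup loop) into one pass
-- maintaining the result set and the unknown list; same return value, same raise points.

-- ===== PORT A =====
-- value.strip().lower()  (the 'value is None' guard is vacuous: elements are Strings)
def pyClean (s : String) : String := PySem.Str.lower (PySem.Str.strip s)

-- OUTPUT_CHOICES = {"buildings", "terrain", "contours", "parcels", "naip", "xyz"}
def OUTPUT_CHOICES_py : PySem.Set String :=
  PySem.Set.ofList ["buildings", "terrain", "contours", "parcels", "naip", "xyz"]

def validate_outputs_py (outputs : List String) : List String :=
  let cleaned := outputs.foldl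
    (fun acc value => let name := pyClean value; if name = "" then acc else acc ++ [name]) []
  if cleaned = [] then []  -- Python raises ValueError here; excluded by Pre_
  else
    let unknown := cleaned.filter (fun name => !(PySem.Set.contains OUTPUT_CHOICES_py name))
    if unknown ≠ [] then []  -- Python raises ValueError here; excluded by Pre_
    else
      -- order-preserving dedup with result list and seen set
      let final := cleaned.foldl
        (fun (st : List String × PySem.Set String) name =>
          if PySem.Set.contains st.2 name then st
          else (st.1 ++ [name], PySem.Set.add st.2 name))
        ([], PySem.Set.ofList [])
      PySem.Set.ofList final.1

-- ===== PORT B =====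
def validate_outputs_py_alt (outputs : List String) : List String :=
  let st := outputs.foldl
    (fun (st : PySem.Set String × List String) value =>
      let name := pyClean value
      if name = "" then st
      else (PySem.Set.add st.1 name,
            if PySem.Set.contains OUTPUT_CHOICES_py name then st.2 else st.2 ++ [name]))
    (PySem.Set.ofList [], [])
  if st.1 = [] then []  -- raise ValueError (empty); excluded by Pre_
  else if st.2 ≠ [] then []  -- raise ValueError (unknown); excluded by Pre_
  else st.1

-- ===== PRECONDITION & SPEC =====
-- Pre_ excludes exactly the inputs where A raises ValueError: no non-empty cleaned name at all,
-- or some cleaned name outside OUTPUT_CHOICES.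
def Pre_validate_outputs_py (outputs : List String) : Prop :=
  (∃ v ∈ outputs, pyClean v ≠ "") ∧
  (∀ v ∈ outputs, pyClean v = "" ∨ pyClean v ∈ OUTPUT_CHOICES_py)
instance (outputs : List String) : Decidable (Pre_validate_outputs_py outputs) := by
  unfold Pre_validate_outputs_py; infer_instance

def pvWitness_validate_outputs_py : List String := ["Terrain ", "xyz", "terrain"]

def Spec_validate_outputs_py (outputs : List String) (out : List String) : Prop := out = validate_outputs_py_alt outputs
instance (outputs : List String) (out : List String) : Decidable (Spec_validate_outputs_py outputs out) := by unfold Spec_validate_outputs_py; infer_instance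

-- ===== CLAIM (what is proved, stated in full; the proofs are below) =====
def Claim_equal_validate_outputs_py : Prop := ∀ (outputs : List String), Dom_validate_outputs_py outputs → Pre_validate_outputs_py outputs → Spec_validate_outputs_py outputs (validate_outputs_py outputs)

-- ===== LEMMAS AND PROOFS =====

-- A's cleaned-list loop is filter-then-map.
lemma cleaned_eq (outputs : List String) :
    outputs.foldl
      (fun acc value => let name := pyClean value; if name = "" then acc else acc ++ [name]) []
    = (outputs.filter (fun v => !(pyClean v = ""))).map pyClean := by
  have hf : (fun (acc : List String) value =>
        let name := pyClean value; if name = "" then acc else acc ++ [name])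
      = (fun acc x => if (!(pyClean x = "")) = true then acc ++ [pyClean x] else acc) := by
    funext acc v
    by_cases hv : pyClean v = "" <;> simp [hv]
  rw [hf, PySem.List.foldl_append_if, List.nil_append]

-- A's dedup loop computes foldl Set.add, as long as seen and result have the same members.
lemma dedupLoop_eq (l : List String) (r s : List String) (h : ∀ x, x ∈ s ↔ x ∈ r) :
    (l.foldl
      (fun (st : List String × PySem.Set String) name =>
        if PySem.Set.contains st.2 name then st
        else (st.1 ++ [name], PySem.Set.add st.2 name)) (r, s)).1
    = l.foldl PySem.Set.add r := by
  induction l generalizing r s with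
  | nil => rfl
  | cons n t ih =>
    simp only [List.foldl_cons]
    by_cases hn : n ∈ s
    · rw [if_pos ((PySem.Set.contains_iff s n).mpr hn),
        PySem.Set.add_of_mem ((h n).mp hn)]
      exact ih r s h
    · rw [if_neg (fun hx => hn ((PySem.Set.contains_iff s n).mp hx)),
        PySem.Set.add_of_not_mem (fun hr => hn ((h n).mpr hr))]
      exact ih (r ++ [n]) (PySem.Set.add s n) (by
        intro x
        rw [PySem.Set.mem_add, h x]
        simp [or_comm])

-- B's single pass splits into the set fold and the unknown filter over the cleaned list.
lemma bfold_eq (outputs : List String) (r u : List String) :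
    outputs.foldl
      (fun (st : PySem.Set String × List String) value =>
        let name := pyClean value
        if name = "" then st
        else (PySem.Set.add st.1 name,
              if PySem.Set.contains OUTPUT_CHOICES_py name then st.2 else st.2 ++ [name])) (r, u)
    = (((outputs.filter (fun v => !(pyClean v = ""))).map pyClean).foldl PySem.Set.add r,
       u ++ ((outputs.filter (fun v => !(pyClean v = ""))).map pyClean).filter
              (fun name => !(PySem.Set.contains OUTPUT_CHOICES_py name))) := by
  induction outputs generalizing r u with
  | nil => simp
  | cons v t ih =>
    simp only [List.foldl_cons, List.filter_cons]
    by_cases hv : pyClean v = ""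
    · simp only [hv, decide_true, Bool.not_true, Bool.false_eq_true, if_false]
      exact ih r u
    · by_cases hk : PySem.Set.contains OUTPUT_CHOICES_py (pyClean v) = true
      · simp only [hv, hk, decide_false, Bool.not_false, if_true, List.map_cons,
          List.foldl_cons, List.filter_cons, Bool.not_true, Bool.false_eq_true, if_false]
        exact ih (PySem.Set.add r (pyClean v)) u
      · rw [Bool.not_eq_true] at hk
        simp only [hv, hk, decide_false, Bool.not_false, if_true, List.map_cons,
          List.foldl_cons, List.filter_cons, Bool.false_eq_true, if_false]
        rw [ih (PySem.Set.add r (pyClean v)) (u ++ [pyClean v])]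
        simp

-- ===== VERDICT (by name: the statement is the Claim_ definition above) =====
theorem validate_outputs_py_spec : Claim_equal_validate_outputs_py := by
  intro outputs _ hpre
  obtain ⟨⟨v0, hv0m, hv0ne⟩, hall⟩ := hpre
  unfold Spec_validate_outputs_py validate_outputs_py validate_outputs_py_alt
  simp only [PySem.Set.ofList_nil, cleaned_eq, bfold_eq]
  set L := (outputs.filter (fun v => !(pyClean v = ""))).map pyClean with hL
  have hv0L : pyClean v0 ∈ L := by
    rw [hL]
    exact List.mem_map_of_mem (List.mem_filter.mpr ⟨hv0m, by simpa using hv0ne⟩)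
  have hLne : L ≠ [] := by intro h; rw [h] at hv0L; exact (List.not_mem_nil) hv0L
  have hmemL : ∀ n ∈ L, n ∈ OUTPUT_CHOICES_py := by
    intro n hn
    rw [hL] at hn
    obtain ⟨w, hw, rfl⟩ := List.mem_map.mp hn
    have hw' := List.mem_filter.mp hw
    rcases hall w hw'.1 with h1 | h2
    · exact absurd h1 (by simpa using hw'.2)
    · exact h2
  have hunk : L.filter (fun name => !(PySem.Set.contains OUTPUT_CHOICES_py name)) = [] := by
    rw [List.filter_eq_nil_iff]
    intro n hn
    simpa using hmemL n hn
  have hfold : L.foldl PySem.Set.add [] = PySem.Set.ofList L := by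
    rw [← PySem.Set.update_map_eq_foldl_add L (fun x => x), List.map_id', PySem.Set.update_nil_left]
  have hofne : PySem.Set.ofList L ≠ [] := by
    intro h
    have := (PySem.Set.mem_ofList L (pyClean v0)).mpr hv0L
    rw [h] at this
    exact (List.not_mem_nil) this
  rw [if_neg hLne, hunk, dedupLoop_eq L [] [] (fun x => Iff.rfl), hfold,
    PySem.Set.ofList_ofList, if_neg hofne]
  simp
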